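-- pv_equiv track=rewrite | github.com/asheuh/pyalgorithms | codebreak/random/words.py | solve
-- ===== SOURCE A (Python) =====
-- def solve(arr: list):
--     maps = {}
--     maxm = 0
--     www = tuple()
--
--     for i in range(len(arr)):
--         word = arr[i]
--
--         for j in range(len(arr)):
--             w = arr[j]
--
--             if not set(word) & set(w):
--                 length = len(word) * len(w)
--
--                 if length > maxm:
--                     maxm = length
--                     www = (word, w)
--     return maxm, www
-- ===== SOURCE B (Python) =====
-- def _mask(w):
--     m = 0
--     for c in w:
--         m |= 1 << ord(c)
--     return m
--
--
-- def solve(arr: list):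
--     # Stage 1: group words by letter-mask, keeping only the maximum length per mask.
--     best_len = {}
--     for w in arr:
--         m = _mask(w)
--         if m not in best_len or len(w) > best_len[m]:
--             best_len[m] = len(w)
--     # Stage 2: maximise the product over pairs of distinct masks.
--     best = 0
--     for m1, l1 in best_len.items():
--         for m2, l2 in best_len.items():
--             if m1 & m2 == 0 and l1 * l2 > best:
--                 best = l1 * l2
--     if best == 0:
--         return 0, ()
--     # Stage 3: recover the first pair (in original order) achieving the maximum.
--     for w1 in arr:
--         for w2 in arr:
--             if _mask(w1) & _mask(w2) == 0 and len(w1) * len(w2) == best: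
--                 return best, (w1, w2)
-- ===== Notes on version B (the rewrite author's own statement) =====
-- stated objective: faster
-- what changed: B replaces A's single all-pairs scan (rebuilding two character sets per pair) by three stages: a dict grouping words by letter-bitmask keeping only the maximum length per mask, a quadratic maximum over the distinct masks only, and a final first-match scan that recovers the first witness pair achieving that maximum.
import Mathlib
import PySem

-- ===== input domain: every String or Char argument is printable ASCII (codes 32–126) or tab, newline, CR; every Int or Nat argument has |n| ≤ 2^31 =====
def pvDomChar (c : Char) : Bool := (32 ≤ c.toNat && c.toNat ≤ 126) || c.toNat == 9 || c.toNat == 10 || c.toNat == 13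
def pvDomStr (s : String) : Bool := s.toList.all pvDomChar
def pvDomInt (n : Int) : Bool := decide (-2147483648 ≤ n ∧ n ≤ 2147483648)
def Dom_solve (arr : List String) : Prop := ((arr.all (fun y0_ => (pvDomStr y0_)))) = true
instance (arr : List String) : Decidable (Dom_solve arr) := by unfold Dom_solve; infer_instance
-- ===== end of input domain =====

-- B replaces A's single all-pairs scan by three stages: a dict grouping words by letter-mask keeping
-- only the maximum length per mask, a quadratic maximum over the (possibly far fewer) distinct masks,
-- and a first-match scan recovering the witness pair; objective: faster on duplicate-mask inputs.

-- ===== PORT A =====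
def solve (arr : List String) : Int × List String :=
  (PySem.List.pyRange 0 (arr.length : Int) 1).foldl (fun st i =>
    let word := PySem.List.pyGetD arr i ""
    (PySem.List.pyRange 0 (arr.length : Int) 1).foldl (fun st j =>
      let w := PySem.List.pyGetD arr j ""
      if PySem.Set.inter (PySem.Set.ofList word.toList) (PySem.Set.ofList w.toList) = [] then
        let length : Int := (word.length : Int) * (w.length : Int)
        if length > st.1 then (length, [word, w]) else st
      else st) st) ((0 : Int), ([] : List String))

-- ===== PORT B =====
def charMask (w : String) : Nat :=
  w.toList.foldl (fun m c => m ||| (1 <<< c.toNat)) 0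

-- stage 3 of Source B: the nested first-match loops (inner loop = first match in arr)
def firstPair (ws : List String) (arr : List String) (best : Int) : Int × List String :=
  match ws with
  | [] => (best, [])   -- unreachable in Source B (best > 0 guarantees a witness)
  | w1 :: rest =>
    match arr.find? (fun w2 =>
        (charMask w1 &&& charMask w2 == 0) && ((w1.length : Int) * (w2.length : Int) == best)) with
    | some w2 => (best, [w1, w2])
    | none => firstPair rest arr best

-- stage 1 of Source B: `if m not in best_len or len(w) > best_len[m]: best_len[m] = len(w)`
def dstep (d : PySem.Dict Nat Int) (w : String) : PySem.Dict Nat Int :=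
  match d.get? (charMask w) with
  | none => d.insert (charMask w) (w.length : Int)
  | some l => if (w.length : Int) > l then d.insert (charMask w) (w.length : Int) else d

def solve_alt (arr : List String) : Int × List String :=
  let d := arr.foldl dstep PySem.Dict.empty
  let items := d.items
  let best := items.foldl (fun b p1 =>
      items.foldl (fun b p2 =>
        if p1.1 &&& p2.1 = 0 ∧ p1.2 * p2.2 > b then p1.2 * p2.2 else b) b) 0
  if best = 0 then (0, []) else firstPair arr arr best

-- ===== PRECONDITION & SPEC =====
def Spec_solve (arr : List String) (out : Int × List String) : Prop := out = solve_alt arr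
instance (arr : List String) (out : Int × List String) : Decidable (Spec_solve arr out) := by unfold Spec_solve; infer_instance

-- ===== CLAIM (what is proved, stated in full; the proofs are below) =====
def Claim_equal_solve : Prop := ∀ (arr : List String), Dom_solve arr → Spec_solve arr (solve arr)

-- ===== LEMMAS AND PROOFS =====

-- abbreviations for the proof (generic over the element type α carrying a mask and a length)
def pvDisj {α : Type} (msk : α → Nat) (p : α × α) : Prop := msk p.1 &&& msk p.2 = 0
def pvProd {α : Type} (ln : α → Int) (p : α × α) : Int := ln p.1 * ln p.2

def pairsOf {α : Type} (xs ys : List α) : List (α × α) :=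
  xs.flatMap (fun a => ys.map (fun b => (a, b)))

-- the numeric part of both quadratic scans, in one generic shape
def gfold {α : Type} (msk : α → Nat) (ln : α → Int) (L : List (α × α)) (m : Int) : Int :=
  L.foldl (fun b p => if msk p.1 &&& msk p.2 = 0 ∧ ln p.1 * ln p.2 > b then ln p.1 * ln p.2 else b) m

theorem le_gfold {α : Type} (msk : α → Nat) (ln : α → Int) (L : List (α × α)) (m : Int) :
    m ≤ gfold msk ln L m := by
  induction L generalizing m with
  | nil => simp [gfold]
  | cons p L ih =>
      simp only [gfold, List.foldl_cons]
      split_ifs with h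
      · exact le_trans (le_of_lt h.2) (ih _)
      · exact ih _

theorem gfold_ge {α : Type} (msk : α → Nat) (ln : α → Int) (L : List (α × α)) (m : Int) :
    ∀ p ∈ L, pvDisj msk p → pvProd ln p ≤ gfold msk ln L m := by
  induction L generalizing m with
  | nil => simp
  | cons q L ih =>
      intro p hp hd
      rcases List.mem_cons.mp hp with hp | hp
      · subst hp
        simp only [gfold, List.foldl_cons]
        split_ifs with h
        · exact le_gfold ..
        · rcases not_and_or.mp h with h | h
          · exact absurd hd h
          · exact le_trans (not_lt.mp h) (le_gfold ..)
      · simp only [gfold, List.foldl_cons]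
        split_ifs <;> exact ih _ p hp hd

theorem gfold_mem {α : Type} (msk : α → Nat) (ln : α → Int) (L : List (α × α)) (m : Int) :
    gfold msk ln L m = m ∨ ∃ p ∈ L, pvDisj msk p ∧ pvProd ln p = gfold msk ln L m := by
  induction L generalizing m with
  | nil => left; simp [gfold]
  | cons q L ih =>
      simp only [gfold, List.foldl_cons]
      split_ifs with h
      · rcases ih (ln q.1 * ln q.2) with h' | ⟨p, hp, hd, he⟩
        · right; exact ⟨q, List.mem_cons_self .., h.1, h'.symm⟩
        · right; exact ⟨p, List.mem_cons_of_mem _ hp, hd, he⟩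
      · rcases ih m with h' | ⟨p, hp, hd, he⟩
        · left; exact h'
        · right; exact ⟨p, List.mem_cons_of_mem _ hp, hd, he⟩

-- the full A loop (value + witness) characterised: value is gfold, witness is the FIRST achiever
def afold (L : List (String × String)) (s : Int × List String) : Int × List String :=
  L.foldl (fun st p =>
    if charMask p.1 &&& charMask p.2 = 0 then
      if (p.1.length : Int) * (p.2.length : Int) > st.1 then
        ((p.1.length : Int) * (p.2.length : Int), [p.1, p.2])
      else st
    else st) s

def strLen (w : String) : Int := (w.length : Int)

theorem afold_char (L : List (String × String)) (m : Int) (ws : List String) :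
    afold L (m, ws) = (gfold charMask strLen L m,
      if gfold charMask strLen L m > m then
        (match L.find? (fun p => (charMask p.1 &&& charMask p.2 == 0) &&
            (strLen p.1 * strLen p.2 == gfold charMask strLen L m)) with
         | some p => [p.1, p.2]
         | none => ws)
      else ws) := by
  induction L generalizing m ws with
  | nil => simp [afold, gfold]
  | cons q L ih =>
      by_cases hd : charMask q.1 &&& charMask q.2 = 0
      · by_cases hgt : strLen q.1 * strLen q.2 > m
        · -- improving step
          have hgt' : m < (q.1.length : Int) * (q.2.length : Int) := by simpa [strLen] using hgt
          have hstep : afold (q :: L) (m, ws) = afold L (strLen q.1 * strLen q.2, [q.1, q.2]) := by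
            simp [afold, hd, hgt', strLen]
          have hg : gfold charMask strLen (q :: L) m = gfold charMask strLen L (strLen q.1 * strLen q.2) := by
            simp [gfold, hd, hgt', strLen]
          have hqg : strLen q.1 * strLen q.2 ≤ gfold charMask strLen L (strLen q.1 * strLen q.2) :=
            le_gfold ..
          rw [hstep, ih, hg]
          by_cases heq : strLen q.1 * strLen q.2 = gfold charMask strLen L (strLen q.1 * strLen q.2)
          · have hpred : (fun p : String × String => (charMask p.1 &&& charMask p.2 == 0) &&
                (strLen p.1 * strLen p.2 == gfold charMask strLen L (strLen q.1 * strLen q.2))) q = true := by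
              simp only [Bool.and_eq_true, beq_iff_eq]
              exact ⟨by simpa using hd, heq⟩
            simp only [List.find?_cons, hpred]
            have hno : ¬ gfold charMask strLen L (strLen q.1 * strLen q.2) > strLen q.1 * strLen q.2 := by
              omega
            have hyes : gfold charMask strLen L (strLen q.1 * strLen q.2) > m := by omega
            simp [hno, hyes]
          · have hlt : gfold charMask strLen L (strLen q.1 * strLen q.2) > strLen q.1 * strLen q.2 :=
              lt_of_le_of_ne hqg heq
            have hfind : (L.find? (fun p => (charMask p.1 &&& charMask p.2 == 0) &&
                (strLen p.1 * strLen p.2 == gfold charMask strLen L (strLen q.1 * strLen q.2)))).isSome := by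
              rcases gfold_mem charMask strLen L (strLen q.1 * strLen q.2) with h' | ⟨p, hp, hdp, hep⟩
              · omega
              · rw [List.find?_isSome]
                refine ⟨p, hp, ?_⟩
                simp only [Bool.and_eq_true, beq_iff_eq]
                exact ⟨by simpa [pvDisj] using hdp, by simpa [pvProd] using hep⟩
            have hq : (fun p : String × String => (charMask p.1 &&& charMask p.2 == 0) &&
                (strLen p.1 * strLen p.2 == gfold charMask strLen L (strLen q.1 * strLen q.2))) q = false := by
              simp only [Bool.and_eq_false_iff, beq_eq_false_iff_ne, ne_eq]
              right
              exact heq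
            simp only [List.find?_cons, hq]
            rcases Option.isSome_iff_exists.mp hfind with ⟨p, hp⟩
            rw [hp]
            have hyes : gfold charMask strLen L (strLen q.1 * strLen q.2) > m := by omega
            simp [hlt, hyes]
        · -- non-improving disjoint step
          have hgt' : ¬ m < (q.1.length : Int) * (q.2.length : Int) := by simpa [strLen] using hgt
          have hstep : afold (q :: L) (m, ws) = afold L (m, ws) := by
            simp [afold, hd, hgt']
          have hg : gfold charMask strLen (q :: L) m = gfold charMask strLen L m := by
            have h2 : ¬ (charMask q.1 &&& charMask q.2 = 0 ∧ strLen q.1 * strLen q.2 > m) := by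
              intro h; exact hgt h.2
            simp only [gfold, List.foldl_cons, strLen] at h2 ⊢
            rw [if_neg h2]
          rw [hstep, ih, hg]
          by_cases hmg : gfold charMask strLen L m > m
          · have hq : (fun p : String × String => (charMask p.1 &&& charMask p.2 == 0) &&
                (strLen p.1 * strLen p.2 == gfold charMask strLen L m)) q = false := by
              simp only [Bool.and_eq_false_iff, beq_eq_false_iff_ne, ne_eq]
              right
              omega
            simp only [List.find?_cons, hq]
          · simp [hmg]
      · -- non-disjoint step
        have hstep : afold (q :: L) (m, ws) = afold L (m, ws) := by
          simp [afold, hd]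
        have hg : gfold charMask strLen (q :: L) m = gfold charMask strLen L m := by
          simp [gfold, hd]
        rw [hstep, ih, hg]
        by_cases hmg : gfold charMask strLen L m > m
        · have hq : (fun p : String × String => (charMask p.1 &&& charMask p.2 == 0) &&
              (strLen p.1 * strLen p.2 == gfold charMask strLen L m)) q = false := by
            simp [hd]
          simp only [List.find?_cons, hq]
        · simp [hmg]

-- ---- bridging A's range loops to list folds, and the set-inter test to the mask test ----

theorem pyfold {β : Type} (xs : List String) (f : β → String → β) (init : β) :
    (PySem.List.pyRange 0 (xs.length : Int) 1).foldl
        (fun st i => f st (PySem.List.pyGetD xs i "")) init = xs.foldl f init :=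
  PySem.List.foldl_pyRange_zero_pyGetD' xs "" f init

theorem testBit_maskFold (xs : List Char) (a : Nat) (k : Nat) :
    (xs.foldl (fun m c => m ||| (1 <<< c.toNat)) a).testBit k
      = (a.testBit k || xs.any (fun c => c.toNat = k)) := by
  induction xs generalizing a with
  | nil => simp
  | cons c xs ih =>
      rw [List.foldl_cons, ih]
      simp [Nat.testBit_or, Nat.shiftLeft_eq, Nat.testBit_two_pow, List.any_cons, Bool.or_assoc]

theorem and_zero_iff (a b : Nat) : a &&& b = 0 ↔ ∀ k, ¬(a.testBit k ∧ b.testBit k) := by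
  constructor
  · intro h k hk
    have := congrArg (fun n => n.testBit k) h
    simp [Nat.testBit_and, hk.1, hk.2] at this
  · intro h
    apply Nat.eq_of_testBit_eq
    intro k
    simp [Nat.testBit_and]
    intro h1
    by_contra h2
    exact h k ⟨h1, by simpa using h2⟩

theorem mask_and_zero_iff (s t : String) :
    (charMask s &&& charMask t = 0) ↔ ∀ c ∈ s.toList, c ∉ t.toList := by
  rw [and_zero_iff]
  constructor
  · intro h c hc hct
    refine h c.toNat ⟨?_, ?_⟩ <;>
      · unfold charMask
        rw [testBit_maskFold]
        simp only [Nat.zero_testBit, Bool.false_or, List.any_eq_true]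
        exact ⟨c, by assumption, by simp⟩
  · intro h k hk
    obtain ⟨hs, ht⟩ := hk
    unfold charMask at hs ht
    rw [testBit_maskFold] at hs ht
    simp only [Nat.zero_testBit, Bool.false_or, List.any_eq_true, decide_eq_true_eq] at hs ht
    obtain ⟨c, hc, hck⟩ := hs
    obtain ⟨d, hd, hdk⟩ := ht
    have : c = d := Char.ext (UInt32.toNat_inj.mp (hck.trans hdk.symm))
    exact h c hc (this ▸ hd)

theorem inter_nil_iff (xs ys : List Char) :
    (PySem.Set.inter (PySem.Set.ofList xs) (PySem.Set.ofList ys) = []) ↔ ∀ c ∈ xs, c ∉ ys := by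
  rw [List.eq_nil_iff_forall_not_mem]
  constructor
  · intro h c hc hcy
    exact h c (by rw [PySem.Set.mem_inter]; simp [PySem.Set.mem_ofList, hc, hcy])
  · intro h c hc
    rw [PySem.Set.mem_inter] at hc
    simp [PySem.Set.mem_ofList] at hc
    exact h c hc.1 hc.2

theorem cond_eq (w1 w2 : String) :
    (PySem.Set.inter (PySem.Set.ofList w1.toList) (PySem.Set.ofList w2.toList) = [])
      ↔ (charMask w1 &&& charMask w2 = 0) := by
  rw [inter_nil_iff, mask_and_zero_iff]

theorem foldl_pairsOf {α β : Type} (xs ys : List α) (f : β → α × α → β) (init : β) :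
    (pairsOf xs ys).foldl f init
      = xs.foldl (fun st a => ys.foldl (fun st b => f st (a, b)) st) init := by
  simp [pairsOf, List.foldl_flatMap, List.foldl_map]

theorem mem_pairsOf {α : Type} (xs ys : List α) (p : α × α) :
    p ∈ pairsOf xs ys ↔ p.1 ∈ xs ∧ p.2 ∈ ys := by
  rcases p with ⟨a, b⟩
  simp only [pairsOf, List.mem_flatMap, List.mem_map, Prod.mk.injEq]
  constructor
  · rintro ⟨x, hx, y, hy, rfl, rfl⟩; exact ⟨hx, hy⟩
  · rintro ⟨ha, hb⟩; exact ⟨a, ha, b, hb, rfl, rfl⟩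

theorem solve_eq_afold (arr : List String) :
    solve arr = afold (pairsOf arr arr) ((0 : Int), ([] : List String)) := by
  unfold solve afold
  rw [foldl_pairsOf]
  refine Eq.trans
    (pyfold arr (fun st word =>
      (PySem.List.pyRange 0 (arr.length : Int) 1).foldl (fun st j =>
        let w := PySem.List.pyGetD arr j ""
        if PySem.Set.inter (PySem.Set.ofList word.toList) (PySem.Set.ofList w.toList) = [] then
          let length : Int := (word.length : Int) * (w.length : Int)
          if length > st.1 then (length, [word, w]) else st
        else st) st) ((0 : Int), ([] : List String))) ?_
  have hin : ∀ (st : Int × List String) (word : String),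
      (PySem.List.pyRange 0 (arr.length : Int) 1).foldl (fun st j =>
        let w := PySem.List.pyGetD arr j ""
        if PySem.Set.inter (PySem.Set.ofList word.toList) (PySem.Set.ofList w.toList) = [] then
          let length : Int := (word.length : Int) * (w.length : Int)
          if length > st.1 then (length, [word, w]) else st
        else st) st
      = arr.foldl (fun st w =>
          if PySem.Set.inter (PySem.Set.ofList word.toList) (PySem.Set.ofList w.toList) = [] then
            let length : Int := (word.length : Int) * (w.length : Int)
            if length > st.1 then (length, [word, w]) else st
          else st) st := by
    intro st word
    exact pyfold arr (fun st w =>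
      if PySem.Set.inter (PySem.Set.ofList word.toList) (PySem.Set.ofList w.toList) = [] then
        let length : Int := (word.length : Int) * (w.length : Int)
        if length > st.1 then (length, [word, w]) else st
      else st) st
  simp only [hin]
  refine PySem.List.foldl_congr_mem _ _ _ _ ?_
  intro acc w1 _
  refine PySem.List.foldl_congr_mem _ _ _ _ ?_
  intro acc2 w2 _
  simp only [cond_eq w1 w2]

-- ---- the grouping dict: soundness and completeness of (mask -> max length) ----

theorem dstep_getD_mono (d : PySem.Dict Nat Int) (w : String) (k : Nat) :
    d.getD k 0 ≤ (dstep d w).getD k 0 := by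
  unfold dstep
  cases hg : d.get? (charMask w) with
  | none =>
      dsimp only
      rw [PySem.Dict.getD_insert]
      split_ifs with hk
      · subst hk
        simp [PySem.Dict.getD_eq_get?_getD, hg]
      · exact le_refl _
  | some l =>
      dsimp only
      split_ifs with hl
      · rw [PySem.Dict.getD_insert]
        split_ifs with hk
        · subst hk
          rw [PySem.Dict.getD_eq_get?_getD, hg]
          simpa using le_of_lt hl
        · exact le_refl _
      · exact le_refl _

theorem dstep_contains_mono (d : PySem.Dict Nat Int) (w : String) (k : Nat)
    (h : d.contains k = true) : (dstep d w).contains k = true := by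
  unfold dstep
  cases d.get? (charMask w) with
  | none =>
      dsimp only
      simp [PySem.Dict.contains_insert, h]
  | some l =>
      dsimp only
      split_ifs
      · simp [PySem.Dict.contains_insert, h]
      · exact h

theorem dstep_self (d : PySem.Dict Nat Int) (w : String) :
    (dstep d w).contains (charMask w) = true ∧
      (w.length : Int) ≤ (dstep d w).getD (charMask w) 0 := by
  unfold dstep
  cases hg : d.get? (charMask w) with
  | none =>
      dsimp only
      exact ⟨PySem.Dict.contains_insert_self .., by simp [PySem.Dict.getD_insert_self]⟩
  | some l =>
      dsimp only
      split_ifs with hl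
      · exact ⟨PySem.Dict.contains_insert_self .., by simp [PySem.Dict.getD_insert_self]⟩
      · refine ⟨?_, ?_⟩
        · rw [PySem.Dict.contains_eq_isSome_get?, hg]
          rfl
        · rw [PySem.Dict.getD_eq_get?_getD, hg]
          simpa using not_lt.mp hl

theorem fold_getD_mono (ws : List String) (d : PySem.Dict Nat Int) (k : Nat) :
    d.getD k 0 ≤ (ws.foldl dstep d).getD k 0 := by
  induction ws generalizing d with
  | nil => simp
  | cons w ws ih => exact le_trans (dstep_getD_mono d w k) (ih (dstep d w))

theorem fold_contains_mono (ws : List String) (d : PySem.Dict Nat Int) (k : Nat)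
    (h : d.contains k = true) : (ws.foldl dstep d).contains k = true := by
  induction ws generalizing d with
  | nil => exact h
  | cons w ws ih => exact ih (dstep d w) (dstep_contains_mono d w k h)

theorem fold_complete (ws : List String) (d : PySem.Dict Nat Int) :
    ∀ w ∈ ws, ((ws.foldl dstep d).contains (charMask w) = true ∧
      (w.length : Int) ≤ (ws.foldl dstep d).getD (charMask w) 0) := by
  induction ws generalizing d with
  | nil => simp
  | cons v ws ih =>
      intro w hw
      rcases List.mem_cons.mp hw with rfl | hw
      · rw [List.foldl_cons]
        exact ⟨fold_contains_mono ws (dstep d w) _ (dstep_self d w).1,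
          le_trans (dstep_self d w).2 (fold_getD_mono ws (dstep d w) _)⟩
      · exact ih (dstep d v) w hw

theorem fold_sound (arr0 : List String) (ws : List String) (d : PySem.Dict Nat Int)
    (hd : ∀ p ∈ d.items, ∃ w ∈ arr0, charMask w = p.1 ∧ (w.length : Int) = p.2)
    (hws : ∀ w ∈ ws, w ∈ arr0) :
    ∀ p ∈ (ws.foldl dstep d).items, ∃ w ∈ arr0, charMask w = p.1 ∧ (w.length : Int) = p.2 := by
  induction ws generalizing d with
  | nil => exact hd
  | cons v ws ih =>
      rw [List.foldl_cons]
      refine ih (dstep d v) ?_ (fun w hw => hws w (List.mem_cons_of_mem _ hw))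
      intro p hp
      have hv : v ∈ arr0 := hws v (List.mem_cons_self ..)
      unfold dstep at hp
      cases hgv : d.get? (charMask v) with
      | none =>
          simp only [hgv] at hp
          rcases (PySem.Dict.mem_items_insert ..).mp hp with rfl | ⟨hp, _⟩
          · exact ⟨v, hv, rfl, rfl⟩
          · exact hd p hp
      | some l =>
          simp only [hgv] at hp
          split_ifs at hp
          · rcases (PySem.Dict.mem_items_insert ..).mp hp with rfl | ⟨hp, _⟩
            · exact ⟨v, hv, rfl, rfl⟩
            · exact hd p hp
          · exact hd p hp

-- ---- equality of the two maxima ----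

theorem best_eq (arr : List String) :
    gfold Prod.fst Prod.snd
        (pairsOf (arr.foldl dstep PySem.Dict.empty).items (arr.foldl dstep PySem.Dict.empty).items) 0
      = gfold charMask strLen (pairsOf arr arr) 0 := by
  set D := arr.foldl dstep PySem.Dict.empty with hD
  have hsound : ∀ p ∈ D.items, ∃ w ∈ arr, charMask w = p.1 ∧ (w.length : Int) = p.2 :=
    fold_sound arr arr PySem.Dict.empty (by simp [PySem.Dict.empty]) (fun w hw => hw)
  have hcomp : ∀ w ∈ arr, ∃ p ∈ D.items, p.1 = charMask w ∧ (w.length : Int) ≤ p.2 := by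
    intro w hw
    obtain ⟨hc, hle⟩ := fold_complete arr PySem.Dict.empty w hw
    have hs : (D.get? (charMask w)).isSome := by
      rw [← PySem.Dict.contains_eq_isSome_get?]
      exact hc
    rcases Option.isSome_iff_exists.mp hs with ⟨l, hl⟩
    refine ⟨(charMask w, l), PySem.Dict.mem_items_of_get?_eq_some D hl, rfl, ?_⟩
    rw [PySem.Dict.getD_eq_get?_getD, hl] at hle
    exact hle
  apply le_antisymm
  · rcases gfold_mem Prod.fst Prod.snd (pairsOf D.items D.items) 0 with h0 | ⟨p, hp, hdp, hep⟩
    · rw [h0]; exact le_gfold ..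
    · obtain ⟨h1, h2⟩ := (mem_pairsOf ..).mp hp
      obtain ⟨w1, hw1, hm1, hl1⟩ := hsound p.1 h1
      obtain ⟨w2, hw2, hm2, hl2⟩ := hsound p.2 h2
      rw [← hep]
      have : pvProd strLen (w1, w2) ≤ gfold charMask strLen (pairsOf arr arr) 0 := by
        refine gfold_ge charMask strLen (pairsOf arr arr) 0 (w1, w2)
          ((mem_pairsOf ..).mpr ⟨hw1, hw2⟩) ?_
        simp only [pvDisj]
        rw [hm1, hm2]
        exact hdp
      simpa [pvProd, strLen, hl1, hl2] using this
  · rcases gfold_mem charMask strLen (pairsOf arr arr) 0 with h0 | ⟨p, hp, hdp, hep⟩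
    · rw [h0]; exact le_gfold ..
    · obtain ⟨h1, h2⟩ := (mem_pairsOf ..).mp hp
      obtain ⟨q1, hq1, hm1, hl1⟩ := hcomp p.1 h1
      obtain ⟨q2, hq2, hm2, hl2⟩ := hcomp p.2 h2
      rw [← hep]
      have hq : pvProd Prod.snd (q1, q2) ≤ gfold Prod.fst Prod.snd (pairsOf D.items D.items) 0 := by
        refine gfold_ge Prod.fst Prod.snd (pairsOf D.items D.items) 0 (q1, q2)
          ((mem_pairsOf ..).mpr ⟨hq1, hq2⟩) ?_
        simp only [pvDisj]
        rw [hm1, hm2]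
        exact hdp
      refine le_trans ?_ hq
      simp only [pvProd, strLen]
      have h10 : (0 : Int) ≤ (p.1.length : Int) := by positivity
      have h20 : (0 : Int) ≤ (p.2.length : Int) := by positivity
      exact mul_le_mul hl1 hl2 h20 (le_trans h10 hl1)

-- ---- the witness search (stage 3) as a first match over the pair list ----

theorem firstPair_eq (ws arr : List String) (best : Int) :
    firstPair ws arr best
      = (best, match (pairsOf ws arr).find? (fun p => (charMask p.1 &&& charMask p.2 == 0) &&
          (strLen p.1 * strLen p.2 == best)) with
         | some p => [p.1, p.2]
         | none => []) := by
  induction ws with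
  | nil => simp [firstPair, pairsOf]
  | cons w ws ih =>
      have hsplit : pairsOf (w :: ws) arr = arr.map (fun b => (w, b)) ++ pairsOf ws arr := by
        simp [pairsOf]
      rw [hsplit, List.find?_append, List.find?_map]
      unfold firstPair
      have hcomp : ((fun p : String × String => (charMask p.1 &&& charMask p.2 == 0) &&
            (strLen p.1 * strLen p.2 == best)) ∘ (fun b => (w, b)))
          = (fun w2 => (charMask w &&& charMask w2 == 0) &&
            ((w.length : Int) * (w2.length : Int) == best)) := by
        funext b
        simp [strLen]
      rw [hcomp]
      cases hf : arr.find? (fun w2 => (charMask w &&& charMask w2 == 0) &&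
          ((w.length : Int) * (w2.length : Int) == best)) with
      | some w2 => simp
      | none => simpa using ih

-- ===== VERDICT (by name: the statement is the Claim_ definition above) =====
theorem solve_spec : Claim_equal_solve := by
  intro arr _
  show solve arr = solve_alt arr
  rw [solve_eq_afold, afold_char]
  unfold solve_alt
  dsimp only
  have hbest : ((arr.foldl dstep PySem.Dict.empty).items.foldl (fun b p1 =>
      (arr.foldl dstep PySem.Dict.empty).items.foldl (fun b p2 =>
        if p1.1 &&& p2.1 = 0 ∧ p1.2 * p2.2 > b then p1.2 * p2.2 else b) b) 0)
      = gfold charMask strLen (pairsOf arr arr) 0 := by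
    rw [← best_eq arr]
    unfold gfold
    rw [foldl_pairsOf]
  rw [hbest]
  by_cases hg : gfold charMask strLen (pairsOf arr arr) 0 = 0
  · simp [hg]
  · have hpos : (0 : Int) < gfold charMask strLen (pairsOf arr arr) 0 :=
      lt_of_le_of_ne (le_gfold ..) (Ne.symm hg)
    rw [if_neg hg, firstPair_eq, if_pos hpos]
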